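-- pv_equiv track=rewrite | github.com/ireneferfo/STELLE | STELLE/formula_generation/formula_manager.py | _find_best_matching_file
-- ===== SOURCE A (Python) =====
-- from typing import List, Optional, Tuple
--
-- def _find_best_matching_file(
--     matching_files: List[Tuple[int, str]], target_count: int
-- ) -> Optional[Tuple[int, str]]:
--     """Find the best matching file (exact > larger > smaller)."""
--     exact_match = next((f for f in matching_files if f[0] == target_count), None)
--     if exact_match:
--         return exact_match
--
--     larger_file = next((f for f in matching_files if f[0] > target_count), None)
--     if larger_file:
--         return larger_file
--
--     return matching_files[-1] if matching_files else None
-- ===== SOURCE B (Python) =====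
-- from typing import List, Optional, Tuple
--
-- def _find_best_matching_file(
--     matching_files: List[Tuple[int, str]], target_count: int
-- ) -> Optional[Tuple[int, str]]:
--     """Single pass: track exact match, first larger, and last element."""
--     first_larger = None
--     last = None
--     for f in matching_files:
--         last = f
--         if f[0] == target_count:
--             return f
--         if first_larger is None and f[0] > target_count:
--             first_larger = f
--     return first_larger if first_larger is not None else last
-- ===== Notes on version B (the rewrite author's own statement) =====
-- stated objective: simpler
-- what changed: Replaced the three separate next()/indexing scans with one loop that returns on an exact match while tracking the first larger and the last element.
import Mathlib
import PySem

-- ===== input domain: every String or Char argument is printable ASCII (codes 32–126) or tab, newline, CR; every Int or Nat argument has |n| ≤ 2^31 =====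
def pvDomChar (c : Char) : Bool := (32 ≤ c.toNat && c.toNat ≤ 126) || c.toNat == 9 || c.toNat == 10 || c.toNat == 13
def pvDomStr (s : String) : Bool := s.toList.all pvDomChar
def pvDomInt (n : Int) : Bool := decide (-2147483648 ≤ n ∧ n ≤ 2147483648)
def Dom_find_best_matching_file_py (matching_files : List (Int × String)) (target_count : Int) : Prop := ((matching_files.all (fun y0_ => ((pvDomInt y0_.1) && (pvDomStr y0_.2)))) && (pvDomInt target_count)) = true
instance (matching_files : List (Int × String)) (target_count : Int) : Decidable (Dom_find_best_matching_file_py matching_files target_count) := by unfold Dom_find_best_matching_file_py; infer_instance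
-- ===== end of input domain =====

-- B replaces A's three separate scans by one loop tracking first-larger and last; objective: simpler.


-- ===== PORT A =====
-- exact_match = next((f for f in matching_files if f[0] == target_count), None); a pair is always truthy
def find_best_matching_file_py (matching_files : List (Int × String)) (target_count : Int) : Option (Int × String) :=
  match matching_files.find? (fun f => f.1 == target_count) with
  | some e => some e
  | none =>
    match matching_files.find? (fun f => decide (f.1 > target_count)) with
    | some l => some l
    | none =>
      -- matching_files[-1] if matching_files else None
      if matching_files.isEmpty then none
      else PySem.List.pyGet? matching_files (-1)

-- ===== PORT B =====
-- the for-loop: state = (first_larger, last); returns on exact match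
def find_best_matching_file_py_alt_go (target_count : Int)
    (first_larger last : Option (Int × String)) :
    List (Int × String) → Option (Int × String)
  | [] => if first_larger.isSome then first_larger else last
  | f :: rest =>
    if f.1 == target_count then some f
    else
      find_best_matching_file_py_alt_go target_count
        (if first_larger.isNone && decide (f.1 > target_count) then some f else first_larger)
        (some f) rest

def find_best_matching_file_py_alt (matching_files : List (Int × String)) (target_count : Int) : Option (Int × String) :=
  find_best_matching_file_py_alt_go target_count none none matching_files

-- ===== PRECONDITION & SPEC =====
def Spec_find_best_matching_file_py (matching_files : List (Int × String)) (target_count : Int) (out : Option (Int × String)) : Prop := out = find_best_matching_file_py_alt matching_files target_count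
instance (matching_files : List (Int × String)) (target_count : Int) (out : Option (Int × String)) : Decidable (Spec_find_best_matching_file_py matching_files target_count out) := by unfold Spec_find_best_matching_file_py; infer_instance

-- ===== CLAIM (what is proved, stated in full; the proofs are below) =====
def Claim_equal_find_best_matching_file_py : Prop := ∀ (matching_files : List (Int × String)) (target_count : Int), Dom_find_best_matching_file_py matching_files target_count → Spec_find_best_matching_file_py matching_files target_count (find_best_matching_file_py matching_files target_count)

-- ===== LEMMAS AND PROOFS =====

-- characterisation of the loop against the three-scan form
theorem alt_go_eq (target_count : Int) :
    ∀ (mf : List (Int × String)) (fl last : Option (Int × String)),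
      find_best_matching_file_py_alt_go target_count fl last mf =
        match mf.find? (fun f => f.1 == target_count) with
        | some e => some e
        | none =>
          match fl with
          | some l => some l
          | none =>
            match mf.find? (fun f => decide (f.1 > target_count)) with
            | some l => some l
            | none => mf.getLast?.or last := by
  intro mf
  induction mf with
  | nil => intro fl last; cases fl <;> simp [find_best_matching_file_py_alt_go]
  | cons f rest ih =>
    intro fl last
    by_cases he : f.1 = target_count
    · simp [find_best_matching_file_py_alt_go, he, List.find?]
    · have hne : (f.1 == target_count) = false := by simp [he]
      rw [find_best_matching_file_py_alt_go]
      simp only [hne, if_false, Bool.false_eq_true]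
      rw [ih]
      have hlast : (f :: rest).getLast?.or last = rest.getLast?.or (some f) := by
        cases rest with
        | nil => simp
        | cons g rs =>
          obtain ⟨x, hx⟩ : ∃ x, (g :: rs).getLast? = some x := by
            cases h : (g :: rs).getLast? with
            | none => simp at h
            | some x => exact ⟨x, rfl⟩
          simp [List.getLast?_cons_cons, hx]
      cases hfind : rest.find? (fun x => x.1 == target_count) with
      | some e => simp [List.find?, hne, hfind]
      | none =>
        cases fl with
        | some l => simp [List.find?, hne, hfind]
        | none =>
          by_cases hg : f.1 > target_count
          · simp [List.find?, hne, hfind, hg]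
          · have hgf : (decide (f.1 > target_count)) = false := by simp [hg]
            simp [List.find?, hne, hfind, hgf, hlast]

-- ===== VERDICT (by name: the statement is the Claim_ definition above) =====
theorem find_best_matching_file_py_spec : Claim_equal_find_best_matching_file_py := by
  intro mf t _
  show find_best_matching_file_py mf t = find_best_matching_file_py_alt mf t
  rw [find_best_matching_file_py_alt, alt_go_eq, find_best_matching_file_py]
  cases hfind : mf.find? (fun f => f.1 == t) with
  | some e => simp
  | none =>
    cases hg : mf.find? (fun f => decide (f.1 > t)) with
    | some l => simp
    | none =>
      simp only [Option.or_none]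
      cases mf with
      | nil => simp
      | cons a as => simp [PySem.List.pyGet?_neg_one]
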